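/- GENERATED by farm/mkstatement.py from design/units.tsv (unit `decode_residue.6ba`) and the assertions of Vorbis/Spec/DecodeResidue6b.lean — do not edit.
   THE STATEMENT of the proof unit `decode_residue.6ba`: segment 6ba of `decode_residue` (46 instructions; entries 0x10f579;
   exits 0x10f4ed,0x10f551; ranges 0x10f579-0x10f634 + 0x10f549-0x10f54d)
   takes each of its entry assertions to one of its exit assertions (`Vorbis.Spec.DecodeResidue.Seg6ba`), given the contracts of its callees.
   What the names mean: Vorbis/Spec/Basic.lean (the shared hypotheses), Vorbis/Spec/DecodeResidue6b.lean (the assertions). The theorem to prove: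
   `theorem decode_residue_6ba_ok : Vorbis.Spec.decode_residue_6ba.Statement`. -/
import Vorbis.Spec.DecodeResidue6b
namespace Vorbis.Spec.decode_residue_6ba
open X86 X86.User Asan

/-- The statement of unit `decode_residue.6ba`. -/
def Statement : Prop :=
  ∀ (Lay : Layout) (_hLay : Lay.hi = 0x1000000) (μ : Microarch) (_hμ : UserX.MicroOK μ) (u₀ : State)
    (_hcode : HasCodeNat Lay u₀ Vorbis.L.decode_residue.entry Vorbis.Code.code_decode_residue.nat Vorbis.L.decode_residue.size)
    (_h_asan_load8_noabort : Asan.SmallCheck Lay μ Vorbis.WayInv (Vorbis.CodeOK u₀) [.rax, .rcx, .rdx] 8 Vorbis.L.__asan_load8_noabort.entry)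
    (_h_asan_load4_noabort : Asan.SmallCheck Lay μ Vorbis.WayInv (Vorbis.CodeOK u₀) [.rax, .rcx, .rdx] 4 Vorbis.L.__asan_load4_noabort.entry)
    (_h_asan_load1_noabort : Asan.SmallCheck Lay μ Vorbis.WayInv (Vorbis.CodeOK u₀) [.rax, .rdx] 1 Vorbis.L.__asan_load1_noabort.entry)
    (_h_asan_load2_noabort : Asan.SmallCheck Lay μ Vorbis.WayInv (Vorbis.CodeOK u₀) [.rax, .rcx, .rdx] 2 Vorbis.L.__asan_load2_noabort.entry),
    Vorbis.Spec.DecodeResidue.Seg6ba Lay μ u₀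

end Vorbis.Spec.decode_residue_6ba
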